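-- pv_equiv track=rewrite | github.com/knowledge-ARI/Nmap | scanner/vuln_search.py | categorize_exploits
-- ===== SOURCE A (Python) =====
-- from collections import defaultdict
--
-- def categorize_exploits(exploits):
--     """
--     对漏洞进行分类
--
--     Args:
--         exploits: 漏洞列表
--
--     Returns:
--         dict: 分类后的漏洞
--     """
--     categories = defaultdict(list)
--
--     for exploit in exploits:
--         exploit_type = exploit.get('type', 'unknown')
--         platform = exploit.get('platform', 'unknown')
--
--         category = f"{exploit_type}_{platform}"
--         categories[category].append(exploit)
--
--     return dict(categories)
-- ===== SOURCE B (Python) =====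
-- def categorize_exploits(exploits):
--     """Group exploits by "type_platform": compute each exploit's category key,
--     take the distinct keys in first-occurrence order, and build each group by
--     filtering the input list for that key."""
--     def key(e):
--         return f"{e.get('type', 'unknown')}_{e.get('platform', 'unknown')}"
--     order = dict.fromkeys(key(e) for e in exploits)
--     return {k: [e for e in exploits if key(e) == k] for k in order}
-- ===== Notes on version B (the rewrite author's own statement) =====
-- stated objective: alternative
-- what changed: Replaces A's single-pass defaultdict accumulation with a two-phase scheme: collect the distinct category keys in first-occurrence order, then build each group by filtering the input for that key.
import Mathlib
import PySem

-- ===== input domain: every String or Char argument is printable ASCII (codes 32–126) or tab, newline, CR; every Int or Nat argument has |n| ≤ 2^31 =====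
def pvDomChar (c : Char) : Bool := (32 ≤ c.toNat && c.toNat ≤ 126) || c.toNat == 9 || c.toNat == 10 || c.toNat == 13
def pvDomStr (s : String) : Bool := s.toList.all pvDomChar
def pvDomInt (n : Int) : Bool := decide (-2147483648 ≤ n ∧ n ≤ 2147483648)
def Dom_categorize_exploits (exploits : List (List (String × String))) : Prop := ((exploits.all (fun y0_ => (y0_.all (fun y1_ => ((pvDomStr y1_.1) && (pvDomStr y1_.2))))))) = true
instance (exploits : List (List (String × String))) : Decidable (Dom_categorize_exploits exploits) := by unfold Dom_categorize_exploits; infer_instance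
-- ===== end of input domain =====

-- B replaces A's one-pass defaultdict accumulation with a distinct-keys-then-filter
-- decomposition (alternative structure, same observable result).

-- ===== PORT A =====
-- category = f"{exploit.get('type','unknown')}_{exploit.get('platform','unknown')}" — same lines in A and B
def pvKeyA (e : List (String × String)) : String :=
  (PySem.Dict.mk e).getD "type" "unknown" ++ "_" ++ (PySem.Dict.mk e).getD "platform" "unknown"

-- A: one pass, categories[category].append(exploit) on a defaultdict(list); dict() = its items
def categorize_exploits (exploits : List (List (String × String))) : List (String × List (List (String × String))) :=
  (exploits.foldl (fun d e => d.modify (pvKeyA e) [] (fun l => l ++ [e])) PySem.Dict.empty).items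

-- ===== PORT B =====
-- B: distinct keys in first-occurrence order (dict.fromkeys), then one filter per key
def categorize_exploits_alt (exploits : List (List (String × String))) : List (String × List (List (String × String))) :=
  (PySem.List.dedup (exploits.map pvKeyA)).map
    (fun k => (k, exploits.filter (fun e => pvKeyA e == k)))

-- ===== PRECONDITION & SPEC =====
def Spec_categorize_exploits (exploits : List (List (String × String))) (out : List (String × List (List (String × String)))) : Prop := out = categorize_exploits_alt exploits
instance (exploits : List (List (String × String))) (out : List (String × List (List (String × String)))) : Decidable (Spec_categorize_exploits exploits out) := by unfold Spec_categorize_exploits; infer_instance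

-- ===== CLAIM (what is proved, stated in full; the proofs are below) =====
def Claim_equal_categorize_exploits : Prop := ∀ (exploits : List (List (String × String))), Dom_categorize_exploits exploits → Spec_categorize_exploits exploits (categorize_exploits exploits)

-- ===== LEMMAS AND PROOFS =====

-- A's loop over exploits is the pair-loop of PySem's grouping lemma, via List.foldl_map
theorem pvFoldl_eq_pairs (exploits : List (List (String × String))) :
    exploits.foldl (fun d e => d.modify (pvKeyA e) [] (fun l => l ++ [e])) PySem.Dict.empty
      = (exploits.map (fun e => (pvKeyA e, e))).foldl
          (fun d p => d.modify p.1 [] (fun l => l ++ [p.2])) PySem.Dict.empty := by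
  rw [List.foldl_map]

theorem pvGetD_loop (exploits : List (List (String × String))) (k : String) :
    (exploits.foldl (fun d e => d.modify (pvKeyA e) [] (fun l => l ++ [e])) PySem.Dict.empty).getD k []
      = exploits.filter (fun e => pvKeyA e == k) := by
  rw [pvFoldl_eq_pairs, PySem.Dict.getD_foldl_modify_append]
  simp [List.filter_map, Function.comp_def]

-- ===== VERDICT (by name: the statement is the Claim_ definition above) =====

theorem categorize_exploits_spec : Claim_equal_categorize_exploits := by
  intro exploits _
  unfold Spec_categorize_exploits categorize_exploits categorize_exploits_alt
  have hnd : (exploits.foldl (fun d e => d.modify (pvKeyA e) [] (fun l => l ++ [e]))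
      PySem.Dict.empty).keys.Nodup := by
    exact PySem.Dict.nodup_keys_foldl_modify_key exploits pvKeyA []
      (fun _ e => fun l => l ++ [e]) PySem.Dict.empty (by simp [pysem])
  rw [PySem.Dict.items_eq_map_keys _ hnd []]
  rw [PySem.Dict.keys_foldl_modify_key]
  have hkeys : PySem.Set.update (PySem.Dict.empty (κ := String)
      (ν := List (List (String × String)))).keys (exploits.map pvKeyA)
      = PySem.List.dedup (exploits.map pvKeyA) := by
    simp [pysem, PySem.Set.update_nil_left]
  rw [hkeys]
  apply List.map_congr_left
  intro k _
  rw [pvGetD_loop]
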